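-- pv_equiv track=rewrite | github.com/andrewelkins/advent-of-code | 2019/06/1/process.py | process
-- ===== SOURCE A (Python) =====
-- def process(data):
--     count = 0
--     for planet in data.keys():
--         num_orbits = 1
--         while data[planet] in data:
--             num_orbits += 1
--             planet = data[planet]
--         count += num_orbits
--     return count
-- ===== SOURCE B (Python) =====
-- def process(data):
--     depth = {}
--     total = 0
--     for planet in data:
--         p = planet
--         path = []
--         while p in data and p not in depth:
--             path.append(p)
--             p = data[p]
--         d = depth.get(p, 0)
--         for q in reversed(path):
--             d += 1
--             depth[q] = d
--         total += depth[planet]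
--     return total
-- ===== Notes on version B (the rewrite author's own statement) =====
-- stated objective: alternative
-- what changed: B memoizes each planet's depth in a dict, walking each unresolved chain once with an explicit path stack and back-filling depths, instead of A's re-walking the full parent chain from scratch for every planet.
import Mathlib
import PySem

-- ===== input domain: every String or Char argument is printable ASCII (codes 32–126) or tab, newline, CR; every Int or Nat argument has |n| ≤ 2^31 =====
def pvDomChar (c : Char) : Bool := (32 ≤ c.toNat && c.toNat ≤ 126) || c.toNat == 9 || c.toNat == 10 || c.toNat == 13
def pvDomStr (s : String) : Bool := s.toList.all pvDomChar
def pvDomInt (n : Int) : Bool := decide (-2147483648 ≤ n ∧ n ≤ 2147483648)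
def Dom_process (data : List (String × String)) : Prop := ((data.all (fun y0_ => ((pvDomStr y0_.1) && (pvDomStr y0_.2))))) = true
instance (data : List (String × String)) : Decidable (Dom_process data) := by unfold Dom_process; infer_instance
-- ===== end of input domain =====

-- B replaces A's per-key re-walk of the whole parent chain by a memo dict of depths filled
-- back along an explicit path stack, so each chain link is resolved once (objective: alternative).

-- the Python callers hand `process` a dict; the list of pairs becomes that dict (later duplicates overwrite)
def mkDict (data : List (String × String)) : PySem.Dict String String :=
  data.foldl (fun d p => d.insert p.1 p.2) PySem.Dict.empty

-- ===== PORT A =====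
-- A's while loop: `while data[planet] in data: num += 1; planet = data[planet]`.
-- fuel only makes it total; under Pre_ it never runs out. get? = none is unreachable
-- (the loop keeps planet a key); Python would raise KeyError there.
def aloop (d : PySem.Dict String String) (planet : String) (num : Int) : Nat → Int
  | 0 => num
  | fuel+1 =>
    match d.get? planet with
    | none => num
    | some q => if d.contains q then aloop d q (num + 1) fuel else num

def process (data : List (String × String)) : Int :=
  let d := mkDict data
  d.keys.foldl (fun count planet => count + aloop d planet 1 d.size) 0

-- ===== PORT B =====
-- B's while loop: climb parents, stacking unvisited keys (fuel for totality only).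
-- getD p p is exact: the branch has already checked `p in data`.
def bwalk (d : PySem.Dict String String) (dep : PySem.Dict String Int)
    (p : String) (path : List String) : Nat → String × List String
  | 0 => (p, path)
  | fuel+1 =>
    if d.contains p && !(dep.contains p) then bwalk d dep (d.getD p p) (path ++ [p]) fuel
    else (p, path)

def process_alt (data : List (String × String)) : Int :=
  let d := mkDict data
  (d.keys.foldl (fun (st : PySem.Dict String Int × Int) planet =>
      let walk := bwalk d st.1 planet [] d.size
      let assign := walk.2.reverse.foldl
        (fun (s : Int × PySem.Dict String Int) q => (s.1 + 1, s.2.insert q (s.1 + 1)))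
        (st.1.getD walk.1 0, st.1)
      (assign.2, st.2 + (assign.2).getD planet 0))
    (PySem.Dict.empty, 0)).2

-- ===== PRECONDITION & SPEC =====
def orbitStep (d : PySem.Dict String String) (p : String) : String := d.getD p p

-- Pre_ excludes exactly the inputs whose parent map has a cycle among the keys: there
-- A's while loop never terminates (the Python diverges, so it returns on nothing excluded).
def Pre_process (data : List (String × String)) : Prop :=
  ∀ k ∈ (mkDict data).keys,
    (mkDict data).contains ((orbitStep (mkDict data))^[(mkDict data).size] k) = false

instance (data : List (String × String)) : Decidable (Pre_process data) := by
  unfold Pre_process; infer_instance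

def pvWitness_process : (List (String × String)) := [("B", "COM"), ("C", "B"), ("D", "C")]

def Spec_process (data : List (String × String)) (out : Int) : Prop := out = process_alt data
instance (data : List (String × String)) (out : Int) : Decidable (Spec_process data out) := by
  unfold Spec_process; infer_instance

-- ===== CLAIM (what is proved, stated in full; the proofs are below) =====
def Claim_equal_process : Prop :=
  ∀ (data : List (String × String)), Dom_process data → Pre_process data →
    Spec_process data (process data)

-- ===== LEMMAS AND PROOFS =====

-- reference depth function (fuel-indexed): depth of p in the parent map, 0 junk when fuel runs out
def fSpec (d : PySem.Dict String String) (p : String) : Nat → Int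
  | 0 => 0
  | fuel+1 => if d.contains p then 1 + fSpec d (orbitStep d p) fuel else 0

theorem fSpec_succ (d : PySem.Dict String String) (p : String) (n : Nat) :
    fSpec d p (n + 1) = if d.contains p then 1 + fSpec d (orbitStep d p) n else 0 := rfl

-- memo invariant for B: every memoised entry is the true depth
def MemoInv (d : PySem.Dict String String) (dep : PySem.Dict String Int) : Prop :=
  ∀ q, dep.contains q = true → d.contains q = true ∧ dep.getD q 0 = fSpec d q (d.size + 1)

-- value B's walk resolves p to, given memo dep
def Cv (d : PySem.Dict String String) (dep : PySem.Dict String Int) (p : String) : Int :=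
  if d.contains p = true then fSpec d p (d.size + 1) else dep.getD p 0

theorem fSpec_stable (d : PySem.Dict String String) :
    ∀ (n : Nat) (p : String) (m : Nat),
      d.contains ((orbitStep d)^[n] p) = false → n ≤ m → fSpec d p m = fSpec d p n := by
  intro n
  induction n with
  | zero =>
    intro p m h _
    simp only [Function.iterate_zero, id] at h
    cases m with
    | zero => rfl
    | succ m => rw [fSpec_succ, h]; rfl
  | succ n ih =>
    intro p m h hm
    cases m with
    | zero => omega
    | succ m =>
      rw [Function.iterate_succ_apply] at h
      rw [fSpec_succ, fSpec_succ, ih (orbitStep d p) m h (by omega)]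

theorem size_pos_of_contains (d : PySem.Dict String String) (p : String)
    (h : d.contains p = true) : 1 ≤ d.size := by
  have hk : p ∈ d.keys := (PySem.Dict.contains_iff_mem_keys d p).mp h
  have : 0 < d.keys.length := List.length_pos_of_mem hk
  simpa [PySem.Dict.keys, PySem.Dict.size] using this

theorem Vstep (d : PySem.Dict String String)
    (hPre : ∀ k ∈ d.keys, d.contains ((orbitStep d)^[d.size] k) = false)
    (p : String) (hp : d.contains p = true) :
    fSpec d p (d.size + 1) = 1 + fSpec d (orbitStep d p) (d.size + 1) := by
  obtain ⟨M, hM⟩ : ∃ M, d.size = M + 1 := by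
    have := size_pos_of_contains d p hp
    exact ⟨d.size - 1, by omega⟩
  have hesc : d.contains ((orbitStep d)^[M] (orbitStep d p)) = false := by
    have := hPre p ((PySem.Dict.contains_iff_mem_keys d p).mp hp)
    rwa [hM, Function.iterate_succ_apply] at this
  rw [hM, fSpec_succ, if_pos hp,
      fSpec_stable d M (orbitStep d p) (M + 1) hesc (by omega),
      fSpec_stable d M (orbitStep d p) (M + 1 + 1) hesc (by omega)]

theorem aloop_eq (d : PySem.Dict String String) :
    ∀ (fuel : Nat) (p : String) (num : Int),
      d.contains p = true →
      d.contains ((orbitStep d)^[fuel] (orbitStep d p)) = false →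
      aloop d p num fuel = num - 1 + fSpec d p (fuel + 1) := by
  intro fuel
  induction fuel with
  | zero =>
    intro p num hp h
    simp only [Function.iterate_zero, id] at h
    rw [fSpec_succ, if_pos hp]
    show num = num - 1 + (1 + 0)
    omega
  | succ fuel ih =>
    intro p num hp h
    obtain ⟨q, hq⟩ : ∃ q, d.get? p = some q := by
      have h2 := PySem.Dict.contains_eq_isSome_get? d p
      rw [hp] at h2
      exact Option.isSome_iff_exists.mp h2.symm
    have hgq : orbitStep d p = q := PySem.Dict.getD_of_get?_eq_some d p hq
    have hred : aloop d p num (fuel + 1) = if d.contains q then aloop d q (num + 1) fuel else num := by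
      simp [aloop, hq]
    rw [hred]
    by_cases hcq : d.contains q = true
    · rw [if_pos hcq]
      have h' : d.contains ((orbitStep d)^[fuel] (orbitStep d q)) = false := by
        rw [hgq] at h
        rwa [Function.iterate_succ_apply] at h
      rw [ih q (num + 1) hcq h', fSpec_succ d p (fuel + 1), if_pos hp, hgq]
      omega
    · rw [if_neg hcq]
      have hcq' : d.contains q = false := by simpa using hcq
      have h0 : fSpec d (orbitStep d p) (fuel + 1) = 0 := by
        rw [fSpec_succ, hgq, hcq']; rfl
      rw [fSpec_succ, if_pos hp, h0]
      omega

theorem bwalk_path (d : PySem.Dict String String) (dep : PySem.Dict String Int) :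
    ∀ (fuel : Nat) (p : String) (path : List String),
      bwalk d dep p path fuel =
        ((bwalk d dep p [] fuel).1, path ++ (bwalk d dep p [] fuel).2) := by
  intro fuel
  induction fuel with
  | zero => intro p path; simp [bwalk]
  | succ fuel ih =>
    intro p path
    by_cases hc : (d.contains p && !(dep.contains p)) = true
    · have h1 : ∀ pa, bwalk d dep p pa (fuel + 1) = bwalk d dep (d.getD p p) (pa ++ [p]) fuel := by
        intro pa; simp [bwalk, hc]
      rw [h1 path, h1 [], ih (d.getD p p) (path ++ [p]), ih (d.getD p p) ([] ++ [p])]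
      simp
    · simp [bwalk, hc]

-- one key resolved: B's walk + back-assignment yields the true depth and keeps the memo invariant
theorem keyStep (d : PySem.Dict String String)
    (hPre : ∀ k ∈ d.keys, d.contains ((orbitStep d)^[d.size] k) = false)
    (dep : PySem.Dict String Int) (hInv : MemoInv d dep) :
    ∀ (n : Nat) (p : String) (fuel : Nat),
      d.contains ((orbitStep d)^[n] p) = false → n ≤ fuel →
      (MemoInv d ((bwalk d dep p [] fuel).2.reverse.foldl
          (fun s q => (s.1 + 1, s.2.insert q (s.1 + 1)))
          (dep.getD (bwalk d dep p [] fuel).1 0, dep)).2) ∧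
      ((bwalk d dep p [] fuel).2.reverse.foldl
          (fun s q => (s.1 + 1, s.2.insert q (s.1 + 1)))
          (dep.getD (bwalk d dep p [] fuel).1 0, dep)).1 = Cv d dep p ∧
      (((bwalk d dep p [] fuel).2.reverse.foldl
          (fun s q => (s.1 + 1, s.2.insert q (s.1 + 1)))
          (dep.getD (bwalk d dep p [] fuel).1 0, dep)).2).getD p 0 = Cv d dep p := by
  intro n
  induction n with
  | zero =>
    intro p fuel h _
    simp only [Function.iterate_zero, id] at h
    have hw : bwalk d dep p [] fuel = (p, []) := by
      cases fuel with
      | zero => rfl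
      | succ fuel => simp [bwalk, h]
    rw [hw]
    simp only [List.reverse_nil, List.foldl_nil]
    refine ⟨hInv, ?_, ?_⟩ <;> simp [Cv, h]
  | succ n ih =>
    intro p fuel h hfuel
    by_cases hc : (d.contains p && !(dep.contains p)) = true
    · have hcp : d.contains p = true := by
        rcases Bool.and_eq_true_iff.mp hc with ⟨h1, _⟩; exact h1
      have hdp : dep.contains p = false := by
        rcases Bool.and_eq_true_iff.mp hc with ⟨_, h2⟩; simpa using h2
      obtain ⟨fl, rfl⟩ : ∃ fl, fuel = fl + 1 := ⟨fuel - 1, by omega⟩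
      have hstep : bwalk d dep p [] (fl + 1) = bwalk d dep (orbitStep d p) [p] fl := by
        simp [bwalk, hc, orbitStep]
      rw [hstep, bwalk_path d dep fl (orbitStep d p) [p]]
      have hnext : d.contains ((orbitStep d)^[n] (orbitStep d p)) = false := by
        rwa [Function.iterate_succ_apply] at h
      have IH := ih (orbitStep d p) fl hnext (by omega)
      obtain ⟨IH1, IH2, IH3⟩ := IH
      -- the fold over ([p] ++ tail).reverse is the fold over tail.reverse, then the step at p
      simp only [List.reverse_append, List.reverse_cons, List.reverse_nil, List.nil_append,
        List.foldl_append, List.foldl_cons, List.foldl_nil]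
      set r := ((bwalk d dep (orbitStep d p) [] fl).2.reverse.foldl
          (fun s q => (s.1 + 1, s.2.insert q (s.1 + 1)))
          (dep.getD (bwalk d dep (orbitStep d p) [] fl).1 0, dep)) with hr
      -- the resolved value at p
      have hval : r.1 + 1 = fSpec d p (d.size + 1) := by
        rw [IH2]
        by_cases hgp : d.contains (orbitStep d p) = true
        · rw [Cv, if_pos hgp, Vstep d hPre p hcp]; omega
        · have hgp' : d.contains (orbitStep d p) = false := by simpa using hgp
          have hdgp : dep.contains (orbitStep d p) = false := by
            by_contra hx
            have hcg := (hInv (orbitStep d p) (by simpa using hx)).1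
            rw [hcg] at hgp'
            exact Bool.noConfusion hgp'
          rw [Cv, if_neg (by simp [hgp']), PySem.Dict.getD_of_not_contains dep 0 hdgp]
          rw [fSpec_succ, if_pos hcp]
          have h0 : fSpec d (orbitStep d p) d.size = 0 := by
            cases hs : d.size with
            | zero => rfl
            | succ m => rw [fSpec_succ, hgp']; rfl
          rw [h0]
          omega
      refine ⟨?_, ?_, ?_⟩
      · intro q hq
        rw [PySem.Dict.contains_insert] at hq
        by_cases hqp : q = p
        · subst hqp
          exact ⟨hcp, by rw [PySem.Dict.getD_insert_self, hval]⟩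
        · have hq' : r.2.contains q = true := by
            rcases Bool.or_eq_true_iff.mp hq with h1 | h1
            · exact absurd (by simpa using h1) hqp
            · exact h1
          obtain ⟨hq1, hq2⟩ := IH1 q hq'
          exact ⟨hq1, by rw [PySem.Dict.getD_insert_of_ne _ _ _ hqp, hq2]⟩
      · show r.1 + 1 = Cv d dep p
        rw [hval, Cv, if_pos hcp]
      · show (r.2.insert p (r.1 + 1)).getD p 0 = Cv d dep p
        rw [PySem.Dict.getD_insert_self, hval, Cv, if_pos hcp]
    · -- walk stops immediately: p is not a key, or already memoised
      have hw : bwalk d dep p [] fuel = (p, []) := by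
        cases fuel with
        | zero => rfl
        | succ fuel =>
          rw [show bwalk d dep p [] (fuel + 1) =
              if (d.contains p && !(dep.contains p)) = true then
                bwalk d dep (d.getD p p) ([] ++ [p]) fuel
              else (p, []) from rfl, if_neg hc]
      rw [hw]
      simp only [List.reverse_nil, List.foldl_nil]
      refine ⟨hInv, ?_, ?_⟩ <;>
      · by_cases hcp : d.contains p = true
        · have hdp : dep.contains p = true :=
            (show d.contains p = true → dep.contains p = true by simpa using hc) hcp
          rw [Cv, if_pos hcp, (hInv p hdp).2]
        · have hcp' : d.contains p = false := by simpa using hcp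
          rw [Cv, if_neg (by simp [hcp'])]

-- B's outer loop accumulates the true depths
theorem outerB (d : PySem.Dict String String)
    (hPre : ∀ k ∈ d.keys, d.contains ((orbitStep d)^[d.size] k) = false) :
    ∀ (ks : List String) (dep : PySem.Dict String Int) (tot : Int),
      MemoInv d dep → (∀ k ∈ ks, k ∈ d.keys) →
      (ks.foldl (fun (st : PySem.Dict String Int × Int) planet =>
          let walk := bwalk d st.1 planet [] d.size
          let assign := walk.2.reverse.foldl
            (fun (s : Int × PySem.Dict String Int) q => (s.1 + 1, s.2.insert q (s.1 + 1)))
            (st.1.getD walk.1 0, st.1)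
          (assign.2, st.2 + (assign.2).getD planet 0)) (dep, tot)).2 =
        ks.foldl (fun c k => c + fSpec d k (d.size + 1)) tot := by
  intro ks
  induction ks with
  | nil => intro dep tot _ _; rfl
  | cons k ks ih =>
    intro dep tot hInv hks
    have hk : k ∈ d.keys := hks k (by simp)
    have hck : d.contains k = true := (PySem.Dict.contains_iff_mem_keys d k).mpr hk
    have hesc : d.contains ((orbitStep d)^[d.size] k) = false := hPre k hk
    have KS := keyStep d hPre dep hInv d.size k d.size hesc (le_refl _)
    obtain ⟨K1, _, K3⟩ := KS
    simp only [List.foldl_cons]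
    rw [ih _ _ K1 (fun x hx => hks x (by simp [hx]))]
    rw [show ((((bwalk d dep k [] d.size).2.reverse.foldl
          (fun s q => (s.1 + 1, s.2.insert q (s.1 + 1)))
          (dep.getD (bwalk d dep k [] d.size).1 0, dep)).2).getD k 0) = Cv d dep k from K3,
        Cv, if_pos hck]

-- A's outer loop accumulates the true depths
theorem outerA (d : PySem.Dict String String)
    (hPre : ∀ k ∈ d.keys, d.contains ((orbitStep d)^[d.size] k) = false) :
    ∀ (ks : List String) (tot : Int), (∀ k ∈ ks, k ∈ d.keys) →
      ks.foldl (fun count planet => count + aloop d planet 1 d.size) tot =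
        ks.foldl (fun c k => c + fSpec d k (d.size + 1)) tot := by
  intro ks
  induction ks with
  | nil => intro tot _; rfl
  | cons k ks ih =>
    intro tot hks
    have hk : k ∈ d.keys := hks k (by simp)
    have hck : d.contains k = true := (PySem.Dict.contains_iff_mem_keys d k).mpr hk
    have hesc : d.contains ((orbitStep d)^[d.size] k) = false := hPre k hk
    have hesc' : d.contains ((orbitStep d)^[d.size] (orbitStep d k)) = false := by
      rw [← Function.iterate_succ_apply, Function.iterate_succ_apply']
      rwa [orbitStep, PySem.Dict.getD_of_not_contains d _ hesc]
    simp only [List.foldl_cons]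
    rw [aloop_eq d d.size k 1 hck hesc']
    rw [ih _ (fun x hx => hks x (by simp [hx]))]
    norm_num

theorem process_spec : Claim_equal_process := by
  intro data _ hPre
  unfold Spec_process process process_alt
  have hPre' : ∀ k ∈ (mkDict data).keys,
      (mkDict data).contains ((orbitStep (mkDict data))^[(mkDict data).size] k) = false := hPre
  have hA := outerA (mkDict data) hPre' (mkDict data).keys 0 (fun _ h => h)
  have hB := outerB (mkDict data) hPre' (mkDict data).keys PySem.Dict.empty 0
    (fun q hq => absurd hq (by simp [PySem.Dict.contains_empty])) (fun _ h => h)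
  exact hA.trans hB.symm
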